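-- pv_equiv track=rewrite | github.com/marbl/MetaCompass | bin/select_references.py | create_aux_dics2
-- ===== SOURCE A (Python) =====
-- import operator
--
-- def create_aux_dics2(markertotalcount, covthreshold,marker_cov):
--    #from highest to lowest coverage print marker and totalcoverage per marker
--    #in addition, add refid(NC_) to ids list; add assemblyid(GCF) to ass list
--    cumulative_cov={}#assembly_acc cum cov
--    cog_num={}#dict of list of cog acc per assembly_acc
--    acc_ref={}#dict of list of acc ref per assembly_acc
--
--    for marker, cov in sorted(marker_cov.items(), key=operator.itemgetter(1), reverse=True):
--        ref_acc = "_".join(marker.split('_')[0:2])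
--        assembly_acc= "_".join(marker.split('_')[2:4])
--        #print ("%s" % assembly_acc)
--        cog_acc ="_".join(marker.split('_')[4:5])
--        if assembly_acc in cumulative_cov:
--             cumulative_cov[assembly_acc]+=cov
--        else:
--             cumulative_cov[assembly_acc]=cov
--        if assembly_acc in cog_num:
--             if cog_acc not in cog_num[assembly_acc]:
--                cog_num[assembly_acc].append(cog_acc)
--        else:
--             cog_num[assembly_acc]=[cog_acc]
--        if assembly_acc in acc_ref:
--            if ref_acc not in acc_ref[assembly_acc]:
--                acc_ref[assembly_acc].append(ref_acc)
--        else: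
--             acc_ref[assembly_acc]=[ref_acc]
--    print ("%s" % assembly_acc)
--    return cumulative_cov,cog_num,acc_ref
-- ===== SOURCE B (Python) =====
-- import operator
--
-- def create_aux_dics2(markertotalcount, covthreshold, marker_cov):
--     # One pass accumulates coverage and RAW (duplicate-keeping) cog/ref lists per
--     # assembly; deduplication is deferred to a single dict.fromkeys pass at the end.
--     cumulative_cov = {}
--     cog_raw = {}
--     ref_raw = {}
--     for marker, cov in sorted(marker_cov.items(), key=operator.itemgetter(1), reverse=True):
--         parts = marker.split('_')
--         assembly_acc = "_".join(parts[2:4])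
--         cumulative_cov[assembly_acc] = cumulative_cov.get(assembly_acc, 0) + cov
--         cog_raw.setdefault(assembly_acc, []).append("_".join(parts[4:5]))
--         ref_raw.setdefault(assembly_acc, []).append("_".join(parts[0:2]))
--     print("%s" % assembly_acc)
--     cog_num = {a: list(dict.fromkeys(v)) for a, v in cog_raw.items()}
--     acc_ref = {a: list(dict.fromkeys(v)) for a, v in ref_raw.items()}
--     return cumulative_cov, cog_num, acc_ref
-- ===== Notes on version B (the rewrite author's own statement) =====
-- stated objective: faster
-- what changed: A deduplicates cog/ref ids on the fly with an O(k) list-membership scan inside the dict-building loop; B appends raw (duplicate-keeping) per-assembly lists in one pass and deduplicates each list afterwards with a single hash-based dict.fromkeys pass, accumulating coverage with dict.get instead of a membership branch.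
import Mathlib
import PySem

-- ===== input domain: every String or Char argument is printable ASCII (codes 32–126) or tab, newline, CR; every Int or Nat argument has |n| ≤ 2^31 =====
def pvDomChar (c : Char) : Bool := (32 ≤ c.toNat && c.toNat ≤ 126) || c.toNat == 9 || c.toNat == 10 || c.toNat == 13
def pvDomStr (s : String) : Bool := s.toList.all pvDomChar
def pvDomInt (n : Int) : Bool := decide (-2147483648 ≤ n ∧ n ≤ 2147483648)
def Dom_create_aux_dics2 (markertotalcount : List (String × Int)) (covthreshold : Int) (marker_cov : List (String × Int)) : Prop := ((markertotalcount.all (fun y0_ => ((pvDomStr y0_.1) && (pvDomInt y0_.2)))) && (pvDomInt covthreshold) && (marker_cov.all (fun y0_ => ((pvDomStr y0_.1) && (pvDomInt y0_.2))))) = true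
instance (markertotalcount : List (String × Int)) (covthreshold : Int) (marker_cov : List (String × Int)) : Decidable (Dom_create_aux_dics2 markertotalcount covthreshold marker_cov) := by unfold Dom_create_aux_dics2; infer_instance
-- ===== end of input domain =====

-- B defers per-assembly cog/ref deduplication to a single post-loop dict.fromkeys pass over
-- raw appended lists (A dedups inside the loop); return-value equivalence only — both Pythons
-- print the last assembly id (a side effect not modelled here).


-- shared helper: marker.split('_')  (split? is none only for an empty separator, so getD is exact)
def pySplitU (s : String) : List String := (PySem.Str.split? s "_").getD []

-- ===== PORT A =====
def create_aux_dics2 (markertotalcount : List (String × Int)) (covthreshold : Int) (marker_cov : List (String × Int)) : (List (String × Int)) × (List (String × List String)) × (List (String × List String)) :=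
  let st := (PySem.List.sorted marker_cov (fun p => p.2) true).foldl
    (fun (st : PySem.Dict String Int × PySem.Dict String (List String) × PySem.Dict String (List String)) p =>
      let parts := pySplitU p.1
      let ref_acc := PySem.Str.join "_" (PySem.List.slice parts (some 0) (some 2))
      let assembly_acc := PySem.Str.join "_" (PySem.List.slice parts (some 2) (some 4))
      let cog_acc := PySem.Str.join "_" (PySem.List.slice parts (some 4) (some 5))
      ( (if st.1.contains assembly_acc then st.1.insert assembly_acc (st.1.getD assembly_acc 0 + p.2)
         else st.1.insert assembly_acc p.2),
        (if st.2.1.contains assembly_acc then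
            (if (st.2.1.getD assembly_acc []).contains cog_acc then st.2.1
             else st.2.1.insert assembly_acc (st.2.1.getD assembly_acc [] ++ [cog_acc]))
         else st.2.1.insert assembly_acc [cog_acc]),
        (if st.2.2.contains assembly_acc then
            (if (st.2.2.getD assembly_acc []).contains ref_acc then st.2.2
             else st.2.2.insert assembly_acc (st.2.2.getD assembly_acc [] ++ [ref_acc]))
         else st.2.2.insert assembly_acc [ref_acc]) ))
    (PySem.Dict.empty, PySem.Dict.empty, PySem.Dict.empty)
  (st.1.items, st.2.1.items, st.2.2.items)

-- ===== PORT B =====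
def create_aux_dics2_alt (markertotalcount : List (String × Int)) (covthreshold : Int) (marker_cov : List (String × Int)) : (List (String × Int)) × (List (String × List String)) × (List (String × List String)) :=
  let st := (PySem.List.sorted marker_cov (fun p => p.2) true).foldl
    (fun (st : PySem.Dict String Int × PySem.Dict String (List String) × PySem.Dict String (List String)) p =>
      let parts := pySplitU p.1
      let assembly_acc := PySem.Str.join "_" (PySem.List.slice parts (some 2) (some 4))
      ( st.1.insert assembly_acc (st.1.getD assembly_acc 0 + p.2),
        st.2.1.modify assembly_acc [] (· ++ [PySem.Str.join "_" (PySem.List.slice parts (some 4) (some 5))]),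
        st.2.2.modify assembly_acc [] (· ++ [PySem.Str.join "_" (PySem.List.slice parts (some 0) (some 2))]) ))
    (PySem.Dict.empty, PySem.Dict.empty, PySem.Dict.empty)
  (st.1.items,
   st.2.1.items.map (fun q => (q.1, PySem.List.dedup q.2)),
   st.2.2.items.map (fun q => (q.1, PySem.List.dedup q.2)))

-- ===== PRECONDITION & SPEC =====
-- Pre_ excludes only the empty marker_cov dict, on which the Python A (and B alike) raises
-- UnboundLocalError at the trailing print of assembly_acc.
def Pre_create_aux_dics2 (markertotalcount : List (String × Int)) (covthreshold : Int) (marker_cov : List (String × Int)) : Prop := marker_cov ≠ []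
instance (markertotalcount : List (String × Int)) (covthreshold : Int) (marker_cov : List (String × Int)) : Decidable (Pre_create_aux_dics2 markertotalcount covthreshold marker_cov) := by unfold Pre_create_aux_dics2; infer_instance
def pvWitness_create_aux_dics2 : (List (String × Int)) × Int × (List (String × Int)) := ([], 0, [("NC_000001_GCF_01_COG1", 3), ("NC_000002_GCF_01_COG1", 5)])
def Spec_create_aux_dics2 (markertotalcount : List (String × Int)) (covthreshold : Int) (marker_cov : List (String × Int)) (out : (List (String × Int)) × (List (String × List String)) × (List (String × List String))) : Prop := out = create_aux_dics2_alt markertotalcount covthreshold marker_cov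
instance (markertotalcount : List (String × Int)) (covthreshold : Int) (marker_cov : List (String × Int)) (out : (List (String × Int)) × (List (String × List String)) × (List (String × List String))) : Decidable (Spec_create_aux_dics2 markertotalcount covthreshold marker_cov out) := by unfold Spec_create_aux_dics2; infer_instance

-- ===== CLAIM (what is proved, stated in full; the proofs are below) =====
def Claim_equal_create_aux_dics2 : Prop := ∀ (markertotalcount : List (String × Int)) (covthreshold : Int) (marker_cov : List (String × Int)), Dom_create_aux_dics2 markertotalcount covthreshold marker_cov → Pre_create_aux_dics2 markertotalcount covthreshold marker_cov → Spec_create_aux_dics2 markertotalcount covthreshold marker_cov (create_aux_dics2 markertotalcount covthreshold marker_cov)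

-- ===== LEMMAS AND PROOFS =====

-- the three field extractors A and B share
def asmKey (p : String × Int) : String := PySem.Str.join "_" (PySem.List.slice (pySplitU p.1) (some 2) (some 4))
def cogVal (p : String × Int) : String := PySem.Str.join "_" (PySem.List.slice (pySplitU p.1) (some 4) (some 5))
def refVal (p : String × Int) : String := PySem.Str.join "_" (PySem.List.slice (pySplitU p.1) (some 0) (some 2))

-- per-component step functions of the two loops
def cumStepA (d : PySem.Dict String Int) (p : String × Int) : PySem.Dict String Int :=
  if d.contains (asmKey p) then d.insert (asmKey p) (d.getD (asmKey p) 0 + p.2)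
  else d.insert (asmKey p) p.2
def cumStepB (d : PySem.Dict String Int) (p : String × Int) : PySem.Dict String Int :=
  d.insert (asmKey p) (d.getD (asmKey p) 0 + p.2)
def stepDedupA (key val : (String × Int) → String) (d : PySem.Dict String (List String)) (p : String × Int) : PySem.Dict String (List String) :=
  if d.contains (key p) then
    (if (d.getD (key p) []).contains (val p) then d
     else d.insert (key p) (d.getD (key p) [] ++ [val p]))
  else d.insert (key p) [val p]
def stepRaw (key val : (String × Int) → String) (d : PySem.Dict String (List String)) (p : String × Int) : PySem.Dict String (List String) :=
  d.modify (key p) [] (· ++ [val p])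

theorem cumStep_eq : cumStepA = cumStepB := by
  funext d p
  unfold cumStepA cumStepB
  by_cases h : d.contains (asmKey p) = true
  · simp [h]
  · rw [if_neg h, PySem.Dict.getD_of_not_contains _ _ (by simpa using h), zero_add]

-- dict.fromkeys of a list with one more element appended
theorem dedup_append_singleton (v : List String) (c : String) :
    PySem.List.dedup (v ++ [c]) = if c ∈ v then PySem.List.dedup v else PySem.List.dedup v ++ [c] := by
  simp only [PySem.List.dedup_eq_ofList, PySem.Set.ofList_append_singleton,
    PySem.Set.add_eq_ite, PySem.Set.mem_ofList]

-- the dedup-on-the-fly fold (A) versus the raw-append fold (B): same keys in the same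
-- order, Nodup keys, and A's value at every key is the ordered dedup of B's raw value.
theorem dedup_fold_inv (key val : (String × Int) → String) (l : List (String × Int))
    (dA dB : PySem.Dict String (List String))
    (hkeys : dA.keys = dB.keys) (hnd : dA.keys.Nodup)
    (hval : ∀ k, dA.getD k [] = PySem.List.dedup (dB.getD k [])) :
    (l.foldl (stepDedupA key val) dA).keys = (l.foldl (stepRaw key val) dB).keys ∧
    (l.foldl (stepDedupA key val) dA).keys.Nodup ∧
    ∀ k, (l.foldl (stepDedupA key val) dA).getD k [] = PySem.List.dedup ((l.foldl (stepRaw key val) dB).getD k []) := by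
  induction l generalizing dA dB with
  | nil => exact ⟨hkeys, hnd, hval⟩
  | cons p t ih =>
    simp only [List.foldl_cons]
    have hiff : dA.contains (key p) = true ↔ dB.contains (key p) = true := by
      rw [PySem.Dict.contains_iff_mem_keys, PySem.Dict.contains_iff_mem_keys, hkeys]
    apply ih
    · -- keys of one step agree
      unfold stepDedupA stepRaw
      by_cases h : dA.contains (key p) = true
      · have hB : dB.contains (key p) = true := hiff.mp h
        rw [if_pos h, PySem.Dict.keys_modify, PySem.Dict.keys_insert_of_contains dB _ hB]
        split
        · exact hkeys
        · rw [PySem.Dict.keys_insert_of_contains dA _ h]; exact hkeys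
      · have hB : dB.contains (key p) = false := by
          rw [← Bool.not_eq_true]; exact fun hc => h (hiff.mpr hc)
        rw [if_neg h, PySem.Dict.keys_modify, PySem.Dict.keys_insert_of_not_contains dB _ hB,
          PySem.Dict.keys_insert_of_not_contains dA _ (by simpa using h), hkeys]
    · -- Nodup preserved
      unfold stepDedupA
      by_cases h : dA.contains (key p) = true
      · rw [if_pos h]
        split
        · exact hnd
        · rwa [PySem.Dict.keys_insert_of_contains dA _ h]
      · rw [if_neg h, PySem.Dict.keys_insert_of_not_contains dA _ (by simpa using h)]
        refine List.Nodup.append hnd (List.nodup_singleton _) ?_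
        intro x hx hy
        rw [List.mem_singleton] at hy; subst hy
        rw [← PySem.Dict.contains_iff_mem_keys] at hx
        exact h hx
    · -- value relation preserved
      intro k
      unfold stepDedupA stepRaw
      by_cases h : dA.contains (key p) = true
      · have hmem : ((dA.getD (key p) []).contains (val p) = true) ↔ val p ∈ dB.getD (key p) [] := by
          rw [hval (key p)]
          simp
        rw [if_pos h]
        by_cases hc : (dA.getD (key p) []).contains (val p) = true
        · rw [if_pos hc]
          by_cases hk : k = key p
          · subst hk
            rw [PySem.Dict.getD_modify_self, dedup_append_singleton,
              if_pos (hmem.mp hc), hval]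
          · rw [PySem.Dict.getD_modify_of_ne _ _ _ hk, hval]
        · rw [if_neg hc]
          by_cases hk : k = key p
          · subst hk
            rw [PySem.Dict.getD_insert_self, PySem.Dict.getD_modify_self,
              dedup_append_singleton, if_neg (fun hm => hc (hmem.mpr hm)), hval]
          · rw [PySem.Dict.getD_insert_of_ne _ _ _ hk, PySem.Dict.getD_modify_of_ne _ _ _ hk, hval]
      · have hB : dB.contains (key p) = false := by
          rw [← Bool.not_eq_true]; exact fun hc => h (hiff.mpr hc)
        rw [if_neg h]
        by_cases hk : k = key p
        · subst hk
          rw [PySem.Dict.getD_insert_self, PySem.Dict.getD_modify_self,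
            PySem.Dict.getD_of_not_contains dB _ hB]
          rfl
        · rw [PySem.Dict.getD_insert_of_ne _ _ _ hk, PySem.Dict.getD_modify_of_ne _ _ _ hk, hval]

-- A's dedup fold equals mapping dedup over the items of B's raw fold
theorem dedup_fold_items (key val : (String × Int) → String) (l : List (String × Int)) :
    (l.foldl (stepDedupA key val) PySem.Dict.empty).items =
    (l.foldl (stepRaw key val) PySem.Dict.empty).items.map (fun q => (q.1, PySem.List.dedup q.2)) := by
  obtain ⟨hkeys, hnd, hval⟩ := dedup_fold_inv key val l PySem.Dict.empty PySem.Dict.empty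
    rfl (by simp [PySem.Dict.keys_empty]) (fun k => by rw [PySem.Dict.getD_empty]; rfl)
  have hndB : (l.foldl (stepRaw key val) PySem.Dict.empty).keys.Nodup := by
    unfold stepRaw
    exact PySem.Dict.nodup_keys_foldl_modify_key l key [] (fun _ p => (· ++ [val p]))
      PySem.Dict.empty (by simp [PySem.Dict.keys_empty])
  rw [PySem.Dict.items_eq_map_keys _ hnd ([] : List String),
    PySem.Dict.items_eq_map_keys _ hndB ([] : List String), hkeys, List.map_map]
  exact List.map_congr_left (fun k _ => by simp only [Function.comp]; rw [hval k])

-- ===== VERDICT (by name: the statement is the Claim_ definition above) =====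
theorem create_aux_dics2_spec : Claim_equal_create_aux_dics2 := by
  intro mtc cth mc _ _
  show
    (((PySem.List.sorted mc (fun p => p.2) true).foldl
        (fun s e => (cumStepA s.1 e,
          (fun s2 e2 => (stepDedupA asmKey cogVal s2.1 e2, stepDedupA asmKey refVal s2.2 e2)) s.2 e))
        (PySem.Dict.empty, PySem.Dict.empty, PySem.Dict.empty)).1.items,
     ((PySem.List.sorted mc (fun p => p.2) true).foldl
        (fun s e => (cumStepA s.1 e,
          (fun s2 e2 => (stepDedupA asmKey cogVal s2.1 e2, stepDedupA asmKey refVal s2.2 e2)) s.2 e))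
        (PySem.Dict.empty, PySem.Dict.empty, PySem.Dict.empty)).2.1.items,
     ((PySem.List.sorted mc (fun p => p.2) true).foldl
        (fun s e => (cumStepA s.1 e,
          (fun s2 e2 => (stepDedupA asmKey cogVal s2.1 e2, stepDedupA asmKey refVal s2.2 e2)) s.2 e))
        (PySem.Dict.empty, PySem.Dict.empty, PySem.Dict.empty)).2.2.items) =
    (((PySem.List.sorted mc (fun p => p.2) true).foldl
        (fun s e => (cumStepB s.1 e,
          (fun s2 e2 => (stepRaw asmKey cogVal s2.1 e2, stepRaw asmKey refVal s2.2 e2)) s.2 e))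
        (PySem.Dict.empty, PySem.Dict.empty, PySem.Dict.empty)).1.items,
     ((PySem.List.sorted mc (fun p => p.2) true).foldl
        (fun s e => (cumStepB s.1 e,
          (fun s2 e2 => (stepRaw asmKey cogVal s2.1 e2, stepRaw asmKey refVal s2.2 e2)) s.2 e))
        (PySem.Dict.empty, PySem.Dict.empty, PySem.Dict.empty)).2.1.items.map (fun q => (q.1, PySem.List.dedup q.2)),
     ((PySem.List.sorted mc (fun p => p.2) true).foldl
        (fun s e => (cumStepB s.1 e,
          (fun s2 e2 => (stepRaw asmKey cogVal s2.1 e2, stepRaw asmKey refVal s2.2 e2)) s.2 e))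
        (PySem.Dict.empty, PySem.Dict.empty, PySem.Dict.empty)).2.2.items.map (fun q => (q.1, PySem.List.dedup q.2)))
  rw [PySem.List.foldl_prod_mk (f := cumStepA)
        (g := fun s2 e2 => (stepDedupA asmKey cogVal s2.1 e2, stepDedupA asmKey refVal s2.2 e2)),
    PySem.List.foldl_prod_mk (f := cumStepB)
        (g := fun s2 e2 => (stepRaw asmKey cogVal s2.1 e2, stepRaw asmKey refVal s2.2 e2)),
    PySem.List.foldl_prod_mk (f := stepDedupA asmKey cogVal) (g := stepDedupA asmKey refVal),
    PySem.List.foldl_prod_mk (f := stepRaw asmKey cogVal) (g := stepRaw asmKey refVal),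
    cumStep_eq, dedup_fold_items asmKey cogVal, dedup_fold_items asmKey refVal]
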